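-- pv_equiv track=rewrite | github.com/miliar/Code_Jam_Webscraper | Solutions_python/Problem_178/721.py | flip_front_plus
-- ===== SOURCE A (Python) =====
-- def flip_front_plus(x):
--     flippedSomething = False
--     counter = 0
--     for i in range(len(x)):
--         if x[i]:
--             x[i] = False
--             flippedSomething = True
--         else:
--             break
--     if flippedSomething:
--         counter = 1
--     return x, counter
-- ===== SOURCE B (Python) =====
-- def flip_front_plus(x):
--     # Recursive structural decomposition: defuse rebuilds the list cons-by-cons,
--     # and the counter comes from a direct head test (flips happen iff x[0] is truthy),
--     # with no loop, no index, no flag and no break.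
--     def defuse(lst):
--         if lst and lst[0]:
--             return [False] + defuse(lst[1:])
--         return lst
--     counter = 1 if x and x[0] else 0
--     x[:] = defuse(x)
--     return x, counter
-- ===== Notes on version B (the rewrite author's own statement) =====
-- stated objective: alternative
-- what changed: B is recursive on the list structure: a helper rebuilds the list cons-by-cons (False consed while the head is truthy), and the counter is derived from a single direct test of the first element instead of A's index loop with break and a flippedSomething flag.
import Mathlib
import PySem

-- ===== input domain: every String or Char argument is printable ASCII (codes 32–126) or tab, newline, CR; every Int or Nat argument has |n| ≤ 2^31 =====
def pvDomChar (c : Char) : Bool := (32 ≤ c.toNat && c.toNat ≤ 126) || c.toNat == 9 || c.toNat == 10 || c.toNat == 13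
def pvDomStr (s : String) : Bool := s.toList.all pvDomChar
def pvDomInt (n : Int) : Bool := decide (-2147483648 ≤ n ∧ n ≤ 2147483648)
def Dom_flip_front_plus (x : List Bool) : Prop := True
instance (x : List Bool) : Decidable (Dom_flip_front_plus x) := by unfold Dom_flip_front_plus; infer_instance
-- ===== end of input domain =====

-- B: recursion on the list structure with the counter from a direct head test,
-- instead of A's index loop with break and a flag; A mutates x in place, B mirrors
-- that via x[:] = …; equivalence proved about the return value. Objective: alternative.

-- ===== PORT A =====
-- A's for-loop over indices with break, flipping leading truthy entries and a flag.
def flipGoA : List Bool → Bool → List Bool × Bool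
  | [], f => ([], f)
  | b :: t, f =>
      if b then
        let r := flipGoA t true
        (false :: r.1, r.2)
      else (b :: t, f)

def flip_front_plus (x : List Bool) : List Bool × Int :=
  let r := flipGoA x false
  (r.1, if r.2 then 1 else 0)

-- ===== PORT B =====
-- defuse: rebuild cons-by-cons while the head is truthy.
def defuseB : List Bool → List Bool
  | [] => []
  | b :: t => if b then false :: defuseB t else b :: t

def flip_front_plus_alt (x : List Bool) : List Bool × Int :=
  let counter : Int := match x with | true :: _ => 1 | _ => 0
  (defuseB x, counter)

-- ===== PRECONDITION & SPEC =====
def Spec_flip_front_plus (x : List Bool) (out : List Bool × Int) : Prop := out = flip_front_plus_alt x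
instance (x : List Bool) (out : List Bool × Int) : Decidable (Spec_flip_front_plus x out) := by unfold Spec_flip_front_plus; infer_instance

-- ===== CLAIM (what is proved, stated in full; the proofs are below) =====
def Claim_equal_flip_front_plus : Prop := ∀ (x : List Bool), Dom_flip_front_plus x → Spec_flip_front_plus x (flip_front_plus x)

-- ===== LEMMAS AND PROOFS =====
theorem flipGoA_eq (t : List Bool) (f : Bool) :
    flipGoA t f = (defuseB t, f || (match t with | true :: _ => true | _ => false)) := by
  induction t generalizing f with
  | nil => simp [flipGoA, defuseB]
  | cons b t ih =>
      cases b
      · simp [flipGoA, defuseB]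
      · simp [flipGoA, defuseB, ih]

-- ===== VERDICT (by name: the statement is the Claim_ definition above) =====
theorem flip_front_plus_spec : Claim_equal_flip_front_plus := by
  intro x _
  unfold Spec_flip_front_plus flip_front_plus flip_front_plus_alt
  rw [flipGoA_eq]
  match x with
  | [] => simp
  | true :: t => simp
  | false :: t => simp
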